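-- pv_equiv track=rewrite | github.com/Aryan-Sajith/Harvard_SSP_AI_Python | Language/parser/parser.py | string_text_processor
-- ===== SOURCE A (Python) =====
-- def string_text_processor(sentence_list):
--     # Here we track non-alphabetical vals and iterate to convert uppercase ones
--     removable_vals = []
--     for index, item in enumerate(sentence_list):
--         if not item.islower():
--             if item.isalpha():
--                 sentence_list[index] = item.lower()
--             else:
--                 removable_vals.append(item)
--
--     # Here we remove non-alpha vals
--     for value in removable_vals:
--         sentence_list.remove(value)
--
--     # Here we return desired output
--     return sentence_list
-- ===== SOURCE B (Python) =====
-- def string_text_processor(sentence_list):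
--     # Single in-place compaction pass with a write pointer, then truncate.
--     w = 0
--     for item in sentence_list:
--         if item.islower() or item.isalpha():
--             sentence_list[w] = item.lower() if item.isalpha() else item
--             w += 1
--     del sentence_list[w:]
--     return sentence_list
-- ===== Notes on version B (the rewrite author's own statement) =====
-- stated objective: alternative
-- what changed: A does two passes (first pass lowercases alpha items in place and collects removable items, second pass deletes each of them with list.remove's linear scan); B does one in-place compaction pass with a write pointer and truncates, removing the remove-by-value scans entirely.
import Mathlib
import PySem

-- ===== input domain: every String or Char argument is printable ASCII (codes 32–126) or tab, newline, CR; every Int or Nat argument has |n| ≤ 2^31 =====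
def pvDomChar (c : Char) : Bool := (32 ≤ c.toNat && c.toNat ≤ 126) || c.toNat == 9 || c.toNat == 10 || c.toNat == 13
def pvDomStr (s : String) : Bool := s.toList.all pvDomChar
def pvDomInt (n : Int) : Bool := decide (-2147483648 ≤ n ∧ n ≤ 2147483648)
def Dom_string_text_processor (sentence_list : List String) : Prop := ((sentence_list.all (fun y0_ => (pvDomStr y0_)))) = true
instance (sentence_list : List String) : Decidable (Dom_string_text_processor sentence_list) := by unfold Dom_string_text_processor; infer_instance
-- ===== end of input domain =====

-- B replaces A's collect-removables-then-remove-by-value pass with a single in-place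
-- write-pointer compaction pass; equivalence of the RETURN value is what is proved
-- (both Pythons also mutate the argument list in place, identically).

-- Python str.islower(): some cased char exists and no cased char is uppercase
-- (exact on ASCII, where the cased chars are exactly the letters; PySem has no
-- string-level islower, so it is ported by hand here, used by both ports).
def pvStrIslower (s : String) : Bool :=
  s.toList.any PySem.Chars.islower && s.toList.all (fun c => !(PySem.Chars.isupper c))

-- ===== PORT A =====
-- first loop: enumerate + in-place assignment (pySetD: the index from enumerate is
-- always in range, so Python's l[i] = v never raises) + appending removables;
-- second loop: list.remove(value) — the removed value was appended from the list and
-- is never equal to a kept (islower) item, so Python's .remove never raises; the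
-- port's `.getD l` fallback is therefore never taken.
def string_text_processor (sentence_list : List String) : List String :=
  let st := (PySem.List.enumerate sentence_list).foldl
    (fun (st : List String × List String) p =>
      if !(pvStrIslower p.2) then
        if PySem.Str.strIsalpha p.2 then
          (PySem.List.pySetD st.1 p.1 (PySem.Str.lower p.2), st.2)
        else (st.1, st.2 ++ [p.2])
      else st)
    (sentence_list, ([] : List String))
  st.2.foldl (fun l v => (PySem.List.remove? l v).getD l) st.1

-- ===== PORT B =====
-- one compaction pass: buffer + write pointer w (always in range: w never exceeds the
-- number of items already read), then `del sentence_list[w:]` = take w.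
def string_text_processor_alt (sentence_list : List String) : List String :=
  let st := sentence_list.foldl
    (fun (st : List String × Nat) item =>
      if pvStrIslower item || PySem.Str.strIsalpha item then
        (st.1.set st.2 (if PySem.Str.strIsalpha item then PySem.Str.lower item else item), st.2 + 1)
      else st)
    (sentence_list, 0)
  st.1.take st.2

-- ===== PRECONDITION & SPEC =====
def Spec_string_text_processor (sentence_list : List String) (out : List String) : Prop := out = string_text_processor_alt sentence_list
instance (sentence_list : List String) (out : List String) : Decidable (Spec_string_text_processor sentence_list out) := by unfold Spec_string_text_processor; infer_instance

-- ===== CLAIM (what is proved, stated in full; the proofs are below) =====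
def Claim_equal_string_text_processor : Prop := ∀ (sentence_list : List String), Dom_string_text_processor sentence_list → Spec_string_text_processor sentence_list (string_text_processor sentence_list)

-- ===== LEMMAS AND PROOFS =====

-- the common value both programs compute: keep islower-or-alpha items, lowercased when alpha
def pvF (s : String) : Option String :=
  if pvStrIslower s || PySem.Str.strIsalpha s then
    some (if PySem.Str.strIsalpha s then PySem.Str.lower s else s)
  else none

-- A's first-pass mapping and its removables predicate
def pvG (s : String) : String :=
  if !(pvStrIslower s) && PySem.Str.strIsalpha s then PySem.Str.lower s else s

def pvBad (s : String) : Bool := !(pvStrIslower s) && !(PySem.Str.strIsalpha s)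

-- character facts --------------------------------------------------------------

theorem pvCharShift (n : Nat) (h1 : 97 ≤ n) (h2 : n ≤ 122) :
    ('a' ≤ Char.ofNat n ∧ Char.ofNat n ≤ 'z') ∧ ¬('A' ≤ Char.ofNat n ∧ Char.ofNat n ≤ 'Z') := by
  have hv : (Char.ofNat n).val.toNat = n := by
    show (Char.ofNat n).toNat = n
    rw [Char.toNat_ofNat, if_pos (Or.inl (by omega))]
  have e1 : ('a' : Char).val.toNat = 97 := rfl
  have e2 : ('z' : Char).val.toNat = 122 := rfl
  have e3 : ('A' : Char).val.toNat = 65 := rfl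
  have e4 : ('Z' : Char).val.toNat = 90 := rfl
  simp only [Char.le_def, UInt32.le_iff_toNat_le, hv, e1, e2, e3, e4]
  omega

theorem pvLowerChar_id (c : Char) (h : PySem.Chars.isupper c = false) :
    PySem.Chars.lowerChar c = c := by
  simp [PySem.Chars.lowerChar, h]

theorem pvLowerChar_islower (c : Char) (h : PySem.Chars.isalpha c = true) :
    PySem.Chars.islower (PySem.Chars.lowerChar c) = true ∧
    PySem.Chars.isupper (PySem.Chars.lowerChar c) = false := by
  have e1 : ('a' : Char).val.toNat = 97 := rfl
  have e2 : ('z' : Char).val.toNat = 122 := rfl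
  have e3 : ('A' : Char).val.toNat = 65 := rfl
  have e4 : ('Z' : Char).val.toNat = 90 := rfl
  simp only [PySem.Chars.isalpha, Bool.or_eq_true] at h
  by_cases hup : PySem.Chars.isupper c = true
  · have hb := hup
    simp only [PySem.Chars.isupper, Bool.and_eq_true, decide_eq_true_eq, Char.le_def,
      UInt32.le_iff_toNat_le, e3, e4] at hb
    have hmain := pvCharShift (c.toNat + 32) (by show 97 ≤ c.val.toNat + 32; omega)
      (by show c.val.toNat + 32 ≤ 122; omega)
    have hlc : PySem.Chars.lowerChar c = Char.ofNat (c.toNat + 32) := by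
      simp [PySem.Chars.lowerChar, hup]
    rw [hlc]
    simp only [PySem.Chars.islower, PySem.Chars.isupper, Bool.and_eq_true, decide_eq_true_eq,
      Bool.and_eq_false_iff, decide_eq_false_iff_not]
    exact ⟨hmain.1, by tauto⟩
  · have hup' : PySem.Chars.isupper c = false := by simpa using hup
    have hl : PySem.Chars.islower c = true := by tauto
    rw [pvLowerChar_id c hup']
    exact ⟨hl, hup'⟩

-- string facts ------------------------------------------------------------------

theorem pvIslower_lower (s : String) (h : PySem.Str.strIsalpha s = true) :
    pvStrIslower (PySem.Str.lower s) = true := by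
  rw [PySem.Str.strIsalpha_eq] at h
  simp only [PySem.Chars.strIsalpha, Bool.and_eq_true, Bool.not_eq_eq_eq_not, Bool.not_true,
    List.isEmpty_eq_false_iff, List.all_eq_true] at h
  obtain ⟨hne, hall⟩ := h
  simp only [pvStrIslower, PySem.Str.toList_lower, PySem.Chars.lower, Bool.and_eq_true,
    List.any_map, List.all_map, List.any_eq_true, List.all_eq_true, Function.comp]
  constructor
  · obtain ⟨c, hc⟩ := List.exists_mem_of_ne_nil _ hne
    exact ⟨c, hc, (pvLowerChar_islower c (hall c hc)).1⟩
  · intro c hc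
    simp [(pvLowerChar_islower c (hall c hc)).2]

theorem pvLower_id (s : String) (h : pvStrIslower s = true) : PySem.Str.lower s = s := by
  simp only [pvStrIslower, Bool.and_eq_true, List.all_eq_true, Bool.not_eq_eq_eq_not,
    Bool.not_true] at h
  apply String.toList_injective
  rw [PySem.Str.toList_lower]
  simp only [PySem.Chars.lower]
  conv_rhs => rw [← List.map_id s.toList]
  exact List.map_congr_left (fun c hc => pvLowerChar_id c (h.2 c hc))

theorem pvIslower_g (s : String) (h : pvBad s = false) : pvStrIslower (pvG s) = true := by
  by_cases hl : pvStrIslower s = true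
  · have hg : pvG s = s := by simp [pvG, hl]
    rw [hg]; exact hl
  · have hl' : pvStrIslower s = false := by simpa using hl
    have ha : PySem.Str.strIsalpha s = true := by
      unfold pvBad at h
      rw [hl'] at h
      simpa using h
    have haL : PySem.Chars.strIsalpha s.toList = true := by
      rw [← PySem.Str.strIsalpha_eq]; exact ha
    have hg : pvG s = PySem.Str.lower s := by simp [pvG, hl', haL]
    rw [hg]
    exact pvIslower_lower s ha

theorem pvF_eq_some_g (s : String) (h : pvBad s = false) : pvF s = some (pvG s) := by
  by_cases hl : pvStrIslower s = true
  · by_cases ha : PySem.Str.strIsalpha s = true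
    · have haL : PySem.Chars.strIsalpha s.toList = true := by
        rw [← PySem.Str.strIsalpha_eq]; exact ha
      have hg : pvG s = s := by simp [pvG, hl]
      have hlow := pvLower_id s hl
      simp [pvF, hl, haL, hg, hlow]
    · have ha' : PySem.Str.strIsalpha s = false := by simpa using ha
      have haL : PySem.Chars.strIsalpha s.toList = false := by
        rw [← PySem.Str.strIsalpha_eq]; exact ha'
      have hg : pvG s = s := by simp [pvG, haL]
      simp [pvF, hl, haL, hg]
  · have hl' : pvStrIslower s = false := by simpa using hl
    have ha : PySem.Str.strIsalpha s = true := by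
      unfold pvBad at h
      rw [hl'] at h
      simpa using h
    have haL : PySem.Chars.strIsalpha s.toList = true := by
      rw [← PySem.Str.strIsalpha_eq]; exact ha
    have hg : pvG s = PySem.Str.lower s := by simp [pvG, hl', haL]
    simp [pvF, hl', haL, hg]

-- A's first loop ----------------------------------------------------------------

def pvAStep (st : List String × List String) (p : Int × String) : List String × List String :=
  if !(pvStrIslower p.2) then
    if PySem.Str.strIsalpha p.2 then
      (PySem.List.pySetD st.1 p.1 (PySem.Str.lower p.2), st.2)
    else (st.1, st.2 ++ [p.2])
  else st

theorem pvALoop (xs : List String) : ∀ (pre acc : List String),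
    (PySem.List.enumerate xs (pre.length : Int)).foldl pvAStep (pre ++ xs, acc) =
      (pre ++ xs.map pvG, acc ++ xs.filter pvBad) := by
  induction xs with
  | nil => intro pre acc; simp [PySem.List.enumerate]
  | cons x xs ih =>
    intro pre acc
    rw [PySem.List.enumerate_cons, List.foldl_cons]
    have hset : PySem.List.pySetD (pre ++ x :: xs) (pre.length : Int) (PySem.Str.lower x)
        = pre ++ PySem.Str.lower x :: xs := by
      rw [PySem.List.pySetD_natCast, List.set_append]
      simp
    by_cases hl : pvStrIslower x = true
    · have hstep : pvAStep (pre ++ x :: xs, acc) ((pre.length : Int), x) = (pre ++ x :: xs, acc) := by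
        simp [pvAStep, hl]
      rw [hstep]
      have hg : pvG x = x := by simp [pvG, hl]
      have hb : pvBad x = false := by simp [pvBad, hl]
      have := ih (pre ++ [x]) acc
      simp only [List.append_assoc, List.singleton_append, List.length_append,
        List.length_singleton] at this
      push_cast at this
      rw [this]
      simp [hg, hb]
    · have hl' : pvStrIslower x = false := by simpa using hl
      by_cases ha : PySem.Str.strIsalpha x = true
      · have haL : PySem.Chars.strIsalpha x.toList = true := by
          rw [← PySem.Str.strIsalpha_eq]; exact ha
        have hstep : pvAStep (pre ++ x :: xs, acc) ((pre.length : Int), x)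
            = (pre ++ PySem.Str.lower x :: xs, acc) := by
          simp [pvAStep, hl', haL, hset]
        rw [hstep]
        have hg : pvG x = PySem.Str.lower x := by simp [pvG, hl', haL]
        have hb : pvBad x = false := by simp [pvBad, haL]
        have := ih (pre ++ [PySem.Str.lower x]) acc
        simp only [List.append_assoc, List.singleton_append, List.length_append,
          List.length_singleton] at this
        push_cast at this
        rw [this]
        simp [hg, hb]
      · have ha' : PySem.Str.strIsalpha x = false := by simpa using ha
        have haL : PySem.Chars.strIsalpha x.toList = false := by
          rw [← PySem.Str.strIsalpha_eq]; exact ha'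
        have hstep : pvAStep (pre ++ x :: xs, acc) ((pre.length : Int), x)
            = (pre ++ x :: xs, acc ++ [x]) := by
          simp [pvAStep, hl', haL]
        rw [hstep]
        have hg : pvG x = x := by simp [pvG, haL]
        have hb : pvBad x = true := by simp [pvBad, hl', haL]
        have := ih (pre ++ [x]) (acc ++ [x])
        simp only [List.append_assoc, List.singleton_append, List.length_append,
          List.length_singleton] at this
        push_cast at this
        rw [this]
        simp [hg, hb]

-- A's second loop ---------------------------------------------------------------

def pvRemStep (l : List String) (v : String) : List String :=
  (PySem.List.remove? l v).getD l

theorem pvRemLoop_cons (r : List String) : ∀ (L : List String) (a : String),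
    (∀ v ∈ r, a ≠ v) → r.foldl pvRemStep (a :: L) = a :: r.foldl pvRemStep L := by
  induction r with
  | nil => intro L a _; rfl
  | cons v r ih =>
    intro L a h
    have hne : a ≠ v := h v (List.mem_cons_self)
    have hstep : pvRemStep (a :: L) v = a :: pvRemStep L v := by
      unfold pvRemStep
      rw [PySem.List.remove?_cons_of_ne _ hne]
      cases PySem.List.remove? L v <;> rfl
    rw [List.foldl_cons, hstep, List.foldl_cons]
    exact ih (pvRemStep L v) a (fun w hw => h w (List.mem_cons_of_mem _ hw))

theorem pvRemPhase (l : List String) :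
    (l.filter pvBad).foldl pvRemStep (l.map pvG) = l.filterMap pvF := by
  induction l with
  | nil => rfl
  | cons x l ih =>
    by_cases hb : pvBad x = true
    · have hb2 : (!pvStrIslower x && !PySem.Str.strIsalpha x) = true := hb
      simp only [Bool.and_eq_true, Bool.not_eq_eq_eq_not, Bool.not_true] at hb2
      have hg : pvG x = x := by
        unfold pvG
        rw [if_neg]
        rw [hb2.2, Bool.and_false]
        exact Bool.false_ne_true
      have hf : pvF x = none := by
        unfold pvF
        rw [if_neg]
        rw [hb2.1, hb2.2, Bool.or_false]
        exact Bool.false_ne_true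
      rw [List.map_cons, List.filter_cons_of_pos hb, List.foldl_cons, hg]
      have hrem : pvRemStep (x :: l.map pvG) x = l.map pvG := by
        unfold pvRemStep
        rw [PySem.List.remove?_cons_self]
        rfl
      rw [hrem, ih, List.filterMap_cons, hf]
    · have hb' : pvBad x = false := by simpa using hb
      rw [List.map_cons, List.filter_cons_of_neg (by simp [hb']), List.filterMap_cons,
        pvF_eq_some_g x hb']
      rw [pvRemLoop_cons _ _ (pvG x) ?_, ih]
      intro v hv
      have hvb : pvBad v = true := List.of_mem_filter hv
      have h1 : pvStrIslower (pvG x) = true := pvIslower_g x hb'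
      have h2 : pvStrIslower v = false := by
        have : (!pvStrIslower v && !PySem.Str.strIsalpha v) = true := hvb
        simp only [Bool.and_eq_true, Bool.not_eq_eq_eq_not, Bool.not_true] at this
        exact this.1
      intro he
      rw [he, h2] at h1
      exact Bool.false_ne_true h1

theorem pvA_eq_filterMap (l : List String) : string_text_processor l = l.filterMap pvF := by
  unfold string_text_processor
  have h := pvALoop l [] []
  simp only [List.nil_append, List.length_nil, Int.natCast_zero] at h
  show (((PySem.List.enumerate l).foldl pvAStep (l, [])).2).foldl pvRemStep
      ((PySem.List.enumerate l).foldl pvAStep (l, [])).1 = l.filterMap pvF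
  rw [show PySem.List.enumerate l = PySem.List.enumerate l ((0 : Nat) : Int) from rfl] at *
  rw [h]
  exact pvRemPhase l

-- B's loop ----------------------------------------------------------------------

def pvBStep (st : List String × Nat) (item : String) : List String × Nat :=
  if pvStrIslower item || PySem.Str.strIsalpha item then
    (st.1.set st.2 (if PySem.Str.strIsalpha item then PySem.Str.lower item else item), st.2 + 1)
  else st

theorem pvTakeSet (buf : List String) (w : Nat) (v : String) (h : w < buf.length) :
    (buf.set w v).take (w + 1) = buf.take w ++ [v] := by
  rw [List.take_add_one, List.take_set, List.getElem?_set_self (by simpa using h)]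
  have : (buf.take w).set w v = buf.take w := by
    apply List.set_eq_of_length_le
    simp
  rw [this]
  rfl

theorem pvBLoop (xs : List String) : ∀ (buf : List String) (w : Nat),
    w + xs.length ≤ buf.length →
    (xs.foldl pvBStep (buf, w)).1.length = buf.length ∧
      (xs.foldl pvBStep (buf, w)).1.take (xs.foldl pvBStep (buf, w)).2 =
        buf.take w ++ xs.filterMap pvF := by
  induction xs with
  | nil => intro buf w _; simp
  | cons x xs ih =>
    intro buf w hlen
    simp only [List.length_cons] at hlen
    by_cases hc : (pvStrIslower x || PySem.Str.strIsalpha x) = true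
    · have hw : w < buf.length := by omega
      have hstep : pvBStep (buf, w) x
          = (buf.set w (if PySem.Str.strIsalpha x then PySem.Str.lower x else x), w + 1) := by
        unfold pvBStep
        rw [if_pos hc]
      have hf : pvF x = some (if PySem.Str.strIsalpha x then PySem.Str.lower x else x) := by
        unfold pvF
        rw [if_pos hc]
      rw [List.foldl_cons, hstep]
      have := ih (buf.set w (if PySem.Str.strIsalpha x then PySem.Str.lower x else x)) (w + 1)
        (by simp only [List.length_set]; omega)
      refine ⟨by rw [this.1]; simp, ?_⟩
      rw [this.2, pvTakeSet buf w _ hw, List.filterMap_cons, hf]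
      simp
    · have hc' : (pvStrIslower x || PySem.Str.strIsalpha x) = false := by simpa using hc
      have hstep : pvBStep (buf, w) x = (buf, w) := by
        unfold pvBStep
        rw [if_neg]
        rw [hc']
        exact Bool.false_ne_true
      have hf : pvF x = none := by
        unfold pvF
        rw [if_neg]
        rw [hc']
        exact Bool.false_ne_true
      rw [List.foldl_cons, hstep]
      have := ih buf w (by omega)
      exact ⟨this.1, by rw [this.2, List.filterMap_cons, hf]⟩

theorem pvB_eq_filterMap (l : List String) : string_text_processor_alt l = l.filterMap pvF := by
  unfold string_text_processor_alt
  show (l.foldl pvBStep (l, 0)).1.take (l.foldl pvBStep (l, 0)).2 = l.filterMap pvF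
  have := pvBLoop l l 0 (by omega)
  rw [this.2]
  rfl

-- ===== VERDICT (by name: the statement is the Claim_ definition above) =====
theorem string_text_processor_spec : Claim_equal_string_text_processor := by
  intro l _
  unfold Spec_string_text_processor
  rw [pvA_eq_filterMap, pvB_eq_filterMap]
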